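-- pv_equiv track=rewrite | github.com/david049/adventofcode2024 | day14/main.py | hasSusRow
-- ===== SOURCE A (Python) =====
-- def hasSusRow(bathroom):
--     for row in bathroom:
--         count = 0
--         for char in row:
--             if char > 0:
--                 count += 1
--                 if count > 9:
--                     return True
--             else:
--                 count = 0
--     return False
-- ===== SOURCE B (Python) =====
-- def hasSusRow(bathroom):
--     return any(
--         all(c > 0 for c in row[i:i + 10])
--         for row in bathroom
--         for i in range(len(row) - 9)
--     )
-- ===== Notes on version B (the rewrite author's own statement) =====
-- stated objective: idiomatic
-- what changed: Replaces A's stateful count/reset scan with early return by a declarative any/all over all length-10 window slices of each row.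
import Mathlib
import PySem

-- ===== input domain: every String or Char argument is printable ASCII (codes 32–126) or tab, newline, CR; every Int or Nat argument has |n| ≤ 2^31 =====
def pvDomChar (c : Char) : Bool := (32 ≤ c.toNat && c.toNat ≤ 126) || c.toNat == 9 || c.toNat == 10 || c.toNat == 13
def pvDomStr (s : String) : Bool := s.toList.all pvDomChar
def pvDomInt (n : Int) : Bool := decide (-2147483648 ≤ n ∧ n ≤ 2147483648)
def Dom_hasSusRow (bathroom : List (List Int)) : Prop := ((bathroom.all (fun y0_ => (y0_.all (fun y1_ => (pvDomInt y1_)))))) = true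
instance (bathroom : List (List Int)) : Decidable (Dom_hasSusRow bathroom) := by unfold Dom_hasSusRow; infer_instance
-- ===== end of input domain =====

-- B replaces A's stateful count/reset scan by an idiomatic sliding-window `any`/`all` one-liner
-- (for each row, does some slice row[i:i+10] consist of positives?); objective: idiomatic, not faster.

-- ===== PORT A =====
-- inner loop of A over one row, carrying the running count of consecutive positives
def hasSusRowScan : List Int → Nat → Bool
  | [], _ => false
  | x :: xs, count =>
    if 0 < x then
      if count + 1 > 9 then true else hasSusRowScan xs (count + 1)
    else hasSusRowScan xs 0

def hasSusRow : List (List Int) → Bool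
  | [] => false
  | row :: rest => if hasSusRowScan row 0 then true else hasSusRow rest

-- ===== PORT B =====
def hasSusRow_alt (bathroom : List (List Int)) : Bool :=
  bathroom.any (fun row =>
    (PySem.List.pyRange 0 ((row.length : Int) - 9) 1).any (fun i =>
      (PySem.List.slice row (some i) (some (i + 10))).all (fun c => decide (0 < c))))

-- ===== PRECONDITION & SPEC =====
def Spec_hasSusRow (bathroom : List (List Int)) (out : Bool) : Prop := out = hasSusRow_alt bathroom
instance (bathroom : List (List Int)) (out : Bool) : Decidable (Spec_hasSusRow bathroom out) := by unfold Spec_hasSusRow; infer_instance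

-- ===== CLAIM (what is proved, stated in full; the proofs are below) =====
def Claim_equal_hasSusRow : Prop := ∀ (bathroom : List (List Int)), Dom_hasSusRow bathroom → Spec_hasSusRow bathroom (hasSusRow bathroom)

-- ===== LEMMAS AND PROOFS =====

-- "row has a run of 10 consecutive positive entries starting at index k"
def GoodAt (r : List Int) (k : Nat) : Prop := ∀ j, j < 10 → 0 < r.getD (k + j) 0
def Good (r : List Int) : Prop := ∃ k, k + 10 ≤ r.length ∧ GoodAt r k

-- Good only looks at the positivity pattern of the entries
lemma good_congr (r s : List Int) (hlen : r.length = s.length)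
    (h : ∀ m, m < r.length → (0 < r.getD m 0 ↔ 0 < s.getD m 0)) : Good r ↔ Good s := by
  constructor
  · rintro ⟨k, hk, hG⟩
    exact ⟨k, by omega, fun j hj => (h (k + j) (by omega)).mp (hG j hj)⟩
  · rintro ⟨k, hk, hG⟩
    exact ⟨k, by omega, fun j hj => (h (k + j) (by omega)).mpr (hG j hj)⟩

-- indexing into the padded list
lemma getD_rep_app (c : Nat) (l : List Int) (m : Nat) :
    (List.replicate c (1:Int) ++ l).getD m 0 = if m < c then 1 else l.getD (m - c) 0 := by
  by_cases h : m < c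
  · rw [if_pos h, List.getD_append _ _ _ _ (by simpa using h),
      List.getD_eq_getElem _ _ (by simpa using h)]
    simp
  · rw [if_neg h, List.getD_append_right _ _ _ _ (by simpa using Nat.le_of_not_lt h)]
    simp

-- characterisation of A's inner scan: c pending positives + a run of 10 in the rest
lemma scan_iff (r : List Int) (c : Nat) (hc : c ≤ 9) :
    hasSusRowScan r c = true ↔ Good (List.replicate c 1 ++ r) := by
  induction r generalizing c with
  | nil =>
    rw [show hasSusRowScan [] c = false from rfl]
    simp only [Bool.false_eq_true, false_iff]
    rintro ⟨k, hk, -⟩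
    simp at hk; omega
  | cons x xs ih =>
    by_cases hx : 0 < x
    · by_cases h9 : c + 1 > 9
      · have hc9 : c = 9 := by omega
        subst hc9
        simp only [hasSusRowScan, if_pos hx, if_pos h9, true_iff]
        refine ⟨0, by simp, fun j hj => ?_⟩
        rw [Nat.zero_add, getD_rep_app]
        by_cases hj9 : j < 9
        · simp [hj9]
        · have hj' : j = 9 := by omega
          subst hj'; simpa using hx
      · have hlhs : hasSusRowScan (x :: xs) c = hasSusRowScan xs (c + 1) := by
          simp [hasSusRowScan, hx, h9]
        rw [hlhs, ih (c + 1) (by omega)]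
        apply good_congr
        · simp only [List.length_append, List.length_replicate, List.length_cons]
          omega
        · intro m hm
          rw [getD_rep_app, getD_rep_app]
          rcases lt_trichotomy m c with h | h | h
          · simp [h, Nat.lt_succ_of_lt h]
          · subst h
            simp [hx]
          · have h1 : ¬ m < c + 1 := by omega
            have h2 : ¬ m < c := by omega
            simp only [if_neg h1, if_neg h2]
            have he : m - c = (m - (c + 1)) + 1 := by omega
            rw [he, List.getD_cons_succ]
    · have hlhs : hasSusRowScan (x :: xs) c = hasSusRowScan xs 0 := by
        simp [hasSusRowScan, hx]
      rw [hlhs, ih 0 (by omega)]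
      simp only [List.replicate_zero, List.nil_append]
      constructor
      · rintro ⟨k, hk, hG⟩
        refine ⟨k + c + 1, by simp; omega, fun j hj => ?_⟩
        rw [getD_rep_app, if_neg (by omega)]
        have he : k + c + 1 + j - c = (k + j) + 1 := by omega
        rw [he, List.getD_cons_succ]
        exact hG j hj
      · rintro ⟨k, hk, hG⟩
        have hlen : k + 10 ≤ c + (xs.length + 1) := by simpa using hk
        have hkc : c + 1 ≤ k := by
          by_contra hlt
          have hj : c - k < 10 := by omega
          have hp := hG (c - k) hj
          rw [getD_rep_app, if_neg (by omega)] at hp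
          have he2 : k + (c - k) - c = 0 := by omega
          rw [he2, List.getD_cons_zero] at hp
          exact hx hp
        refine ⟨k - (c + 1), by omega, fun j hj => ?_⟩
        have hp := hG j hj
        rw [getD_rep_app, if_neg (by omega)] at hp
        have he : k + j - c = (k - (c + 1) + j) + 1 := by omega
        rw [he, List.getD_cons_succ] at hp
        exact hp

-- a length-10 window slice is all-positive iff GoodAt holds at its start
lemma all_window (r : List Int) (k : Nat) (h : k + 10 ≤ r.length) :
    ((List.take 10 (List.drop k r)).all (fun c => decide (0 < c)) = true) ↔ GoodAt r k := by
  rw [List.all_eq_true]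
  constructor
  · intro ha j hj
    have hlen : j < (List.take 10 (List.drop k r)).length := by
      simp [List.length_take, List.length_drop]; omega
    have hmem := List.getElem_mem hlen
    have := ha _ hmem
    rw [List.getElem_take, List.getElem_drop] at this
    rw [List.getD_eq_getElem r 0 (by omega)]
    simpa using this
  · intro hG x hx
    obtain ⟨j, hjl, rfl⟩ := List.mem_iff_getElem.mp hx
    have hj : j < 10 := by simp [List.length_take, List.length_drop] at hjl; omega
    have := hG j hj
    rw [List.getD_eq_getElem r 0 (by omega)] at this
    simp [List.getElem_take, List.getElem_drop]
    convert this using 2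

-- characterisation of B's inner window test
lemma window_iff (r : List Int) :
    ((PySem.List.pyRange 0 ((r.length : Int) - 9) 1).any (fun i =>
      (PySem.List.slice r (some i) (some (i + 10))).all (fun c => decide (0 < c)))) = true ↔ Good r := by
  rw [List.any_eq_true]
  constructor
  · rintro ⟨i, hmem, hall⟩
    obtain ⟨h0, hlt⟩ := PySem.List.mem_pyRange_one.mp hmem
    lift i to ℕ using h0 with k
    have hk : k + 10 ≤ r.length := by omega
    rw [PySem.List.slice_toNat r (by omega) (by omega)] at hall
    have h10 : ((k : Int) + 10).toNat - (k : Int).toNat = 10 := by omega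
    rw [h10, Int.toNat_natCast] at hall
    exact ⟨k, hk, (all_window r k hk).mp hall⟩
  · rintro ⟨k, hk, hG⟩
    refine ⟨(k : Int), PySem.List.mem_pyRange_one.mpr ⟨by omega, by omega⟩, ?_⟩
    rw [PySem.List.slice_toNat r (by omega) (by omega)]
    have h10 : ((k : Int) + 10).toNat - (k : Int).toNat = 10 := by omega
    rw [h10, Int.toNat_natCast]
    exact (all_window r k hk).mpr hG

-- ===== VERDICT (by name: the statement is the Claim_ definition above) =====
lemma equal_all (bathroom : List (List Int)) : hasSusRow bathroom = hasSusRow_alt bathroom := by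
  unfold hasSusRow_alt
  induction bathroom with
  | nil => simp [hasSusRow]
  | cons row rest ih =>
    simp only [hasSusRow, List.any_cons]
    by_cases h : hasSusRowScan row 0 = true
    · have : Good row := by simpa using (scan_iff row 0 (by omega)).mp h
      simp [h, (window_iff row).mpr this]
    · have hG : ¬ Good row := fun g => h ((scan_iff row 0 (by omega)).mpr (by simpa using g))
      have hw : ¬ ((PySem.List.pyRange 0 ((row.length : Int) - 9) 1).any (fun i =>
          (PySem.List.slice row (some i) (some (i + 10))).all (fun c => decide (0 < c))) = true) :=
        fun w => hG ((window_iff row).mp w)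
      simp only [Bool.not_eq_true] at h hw
      simpa [h, hw, hasSusRow_alt] using ih

theorem hasSusRow_spec : Claim_equal_hasSusRow := fun b _ => equal_all b
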